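-- pv_equiv track=rewrite | github.com/AndrewHuStudio/MediArch | backend/app/agents/mongodb_agent/agent.py | _count_doc_distribution
-- ===== SOURCE A (Python) =====
-- from typing import Any, Dict, List, Optional
--
-- def _count_doc_distribution(chunks: List[Dict[str, Any]]) -> Dict[str, int]:
--     dist: Dict[str, int] = {}
--     for ch in chunks or []:
--         doc_name = (
--             ch.get("doc_title")
--             or ch.get("source_document")
--             or ch.get("doc_category")
--             or "unknown"
--         )
--         dist[doc_name] = dist.get(doc_name, 0) + 1
--     return dist
-- ===== SOURCE B (Python) =====
-- def _count_doc_distribution(chunks):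
--     names = [
--         ch.get("doc_title")
--         or ch.get("source_document")
--         or ch.get("doc_category")
--         or "unknown"
--         for ch in chunks or []
--     ]
--     return {name: names.count(name) for name in dict.fromkeys(names)}
-- ===== Notes on version B (the rewrite author's own statement) =====
-- stated objective: alternative
-- what changed: Replaces the single-pass dict accumulation (increment a running counter per chunk) with a two-pass decomposition: first extract all document names into a list, then build the result as {name: names.count(name)} over the first-occurrence-ordered distinct names.
import Mathlib
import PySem

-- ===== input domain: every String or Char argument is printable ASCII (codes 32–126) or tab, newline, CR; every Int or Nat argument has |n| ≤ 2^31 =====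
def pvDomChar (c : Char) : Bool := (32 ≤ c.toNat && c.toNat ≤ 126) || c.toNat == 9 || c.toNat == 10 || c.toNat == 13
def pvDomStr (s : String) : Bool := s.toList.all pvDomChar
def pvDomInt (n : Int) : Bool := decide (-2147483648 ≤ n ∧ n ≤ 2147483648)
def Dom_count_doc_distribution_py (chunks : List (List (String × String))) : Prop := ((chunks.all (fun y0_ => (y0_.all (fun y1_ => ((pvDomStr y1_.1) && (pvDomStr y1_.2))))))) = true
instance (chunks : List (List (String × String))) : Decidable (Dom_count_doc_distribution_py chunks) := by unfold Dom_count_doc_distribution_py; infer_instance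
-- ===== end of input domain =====

-- ===== PORT A =====
-- B re-implements A as a two-pass name-extraction + per-distinct-name count; equivalent return value, no speed claim.

-- Python's `x or y` on an Optional[str] `x`: None and "" are falsy.
def pvOrStr (o : Option String) (y : String) : String :=
  match o with
  | some s => if s = "" then y else s
  | none => y

-- (ch.get("doc_title") or ch.get("source_document") or ch.get("doc_category") or "unknown")
def pvDocName (ch : List (String × String)) : String :=
  let d := PySem.Dict.ofList ch
  pvOrStr (d.get? "doc_title")
    (pvOrStr (d.get? "source_document")
      (pvOrStr (d.get? "doc_category") "unknown"))

def count_doc_distribution_py (chunks : List (List (String × String))) : List (String × Int) :=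
  -- dist = {}; for ch in chunks or []: dist[doc_name] = dist.get(doc_name, 0) + 1; return dist
  (chunks.foldl
    (fun dist ch =>
      let doc_name := pvDocName ch
      dist.insert doc_name (dist.getD doc_name 0 + 1))
    PySem.Dict.empty).items

-- ===== PORT B =====
def count_doc_distribution_py_alt (chunks : List (List (String × String))) : List (String × Int) :=
  let names := chunks.map pvDocName
  (PySem.List.dedup names).map (fun name => (name, (names.count name : Int)))

-- ===== PRECONDITION & SPEC =====
def Spec_count_doc_distribution_py (chunks : List (List (String × String))) (out : List (String × Int)) : Prop := out = count_doc_distribution_py_alt chunks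
instance (chunks : List (List (String × String))) (out : List (String × Int)) : Decidable (Spec_count_doc_distribution_py chunks out) := by unfold Spec_count_doc_distribution_py; infer_instance

-- ===== CLAIM (what is proved, stated in full; the proofs are below) =====
def Claim_equal_count_doc_distribution_py : Prop := ∀ (chunks : List (List (String × String))), Dom_count_doc_distribution_py chunks → Spec_count_doc_distribution_py chunks (count_doc_distribution_py chunks)

-- ===== LEMMAS AND PROOFS =====

-- ===== VERDICT (by name: the statement is the Claim_ definition above) =====
theorem count_doc_distribution_py_spec : Claim_equal_count_doc_distribution_py := by
  intro chunks _
  unfold Spec_count_doc_distribution_py count_doc_distribution_py count_doc_distribution_py_alt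
  show _ = List.map _ (PySem.List.dedup (chunks.map pvDocName))
  rw [show (fun (dist : PySem.Dict String Int) ch =>
        let doc_name := pvDocName ch
        dist.insert doc_name (dist.getD doc_name 0 + 1))
      = (fun dist ch => dist.insert (pvDocName ch) (dist.getD (pvDocName ch) 0 + 1)) from rfl,
     ← List.foldl_map (f := pvDocName)
        (g := fun (dist : PySem.Dict String Int) doc_name => dist.insert doc_name (dist.getD doc_name 0 + 1)),
     PySem.Dict.foldl_insert_getD_add_one_eq_counter, PySem.Dict.items_counter,
     PySem.List.dedup_eq_ofList]
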